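-- pv_equiv track=rewrite | github.com/bilel-amri0/SkillSync | backend/advanced_ml_modules.py | _extract_education_section
-- ===== SOURCE A (Python) =====
-- def _extract_education_section(text: str) -> str:
--     """Find education section"""
--     lines = text.split('\n')
--     edu_section = []
--     in_edu = False
--
--     for line in lines:
--         line_lower = line.lower()
--         if any(kw in line_lower for kw in ['education', 'academic', 'qualification', 'degree']):
--             in_edu = True
--         elif in_edu and any(kw in line_lower for kw in ['experience', 'employment', 'skills', 'projects']):
--             break
--
--         if in_edu:
--             edu_section.append(line)
--
--     return '\n'.join(edu_section)
-- ===== SOURCE B (Python) =====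
-- def _extract_education_section(text: str) -> str:
--     """Find education section by scanning newline offsets in the raw string and
--     returning a single slice text[start:end]; never builds a list of lines."""
--     EDU = ('education', 'academic', 'qualification', 'degree')
--     STOP = ('experience', 'employment', 'skills', 'projects')
--     n = len(text)
--     start = -1
--     i = 0
--     while True:
--         j = text.find('\n', i)
--         end = n if j == -1 else j
--         low = text[i:end].lower()
--         if start < 0:
--             if any(k in low for k in EDU):
--                 start = i
--         elif any(k in low for k in STOP) and not any(k in low for k in EDU):
--             return text[start:i - 1]
--         if j == -1:
--             return text[start:] if start >= 0 else ''
--         i = j + 1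
-- ===== Notes on version B (the rewrite author's own statement) =====
-- stated objective: alternative
-- what changed: B never splits the text into a list of lines: it scans newline offsets in the raw string with str.find, lowercases each line slice in place, and returns a single slice text[start:end], where A builds a line list, runs a flag-driven accumulating loop with a break, and joins the collected lines.
import Mathlib
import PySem

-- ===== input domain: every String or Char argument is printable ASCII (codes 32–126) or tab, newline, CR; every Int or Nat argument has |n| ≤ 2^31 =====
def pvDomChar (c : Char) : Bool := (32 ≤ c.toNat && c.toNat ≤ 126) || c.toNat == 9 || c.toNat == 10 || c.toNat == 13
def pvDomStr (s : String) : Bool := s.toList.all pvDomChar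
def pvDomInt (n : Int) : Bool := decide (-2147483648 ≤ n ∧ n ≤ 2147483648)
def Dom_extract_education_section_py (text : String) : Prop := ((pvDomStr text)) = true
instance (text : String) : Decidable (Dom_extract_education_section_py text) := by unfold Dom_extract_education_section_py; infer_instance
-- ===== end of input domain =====

-- B replaces A's split-into-lines + flag-accumulating loop + join by a scan over newline
-- OFFSETS in the raw string that returns a single slice text[start:end]; objective: alternative.

-- ===== PORT A =====
-- A's keyword lists and line predicates (string level, as in A)
def eduKws : List String := ["education", "academic", "qualification", "degree"]
def stopKws : List String := ["experience", "employment", "skills", "projects"]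

def isEduLine (l : String) : Bool := eduKws.any (fun kw => PySem.Str.isIn kw (PySem.Str.lower l))
def isStopLine (l : String) : Bool := stopKws.any (fun kw => PySem.Str.isIn kw (PySem.Str.lower l))

-- text.split('\n'): sep is the nonempty literal "\n", so split? is always `some`; getD [] is never taken.
def pyLines (text : String) : List String := (PySem.Str.split? text "\n").getD []

-- A's for-loop with the `in_edu` flag, `break`, and accumulation, as structural recursion.
def loopA : List String → Bool → List String
  | [], _ => []
  | l :: rest, inEdu =>
      if isEduLine l then l :: loopA rest true          -- sets in_edu, then appends
      else if inEdu && isStopLine l then []             -- break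
      else if inEdu then l :: loopA rest inEdu
      else loopA rest inEdu

def extract_education_section_py (text : String) : String :=
  PySem.Str.join "\n" (loopA (pyLines text) false)

-- ===== PORT B =====
-- B's keyword lists on code points; `any(k in low for k in …)` on an already-lowered line slice
def eduKwsC : List (List Char) := ["education".toList, "academic".toList, "qualification".toList, "degree".toList]
def stopKwsC : List (List Char) := ["experience".toList, "employment".toList, "skills".toList, "projects".toList]

def eduHit (low : List Char) : Bool := eduKwsC.any (fun kw => PySem.Chars.isIn kw low)
def stopHit (low : List Char) : Bool := stopKwsC.any (fun kw => PySem.Chars.isIn kw low)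

-- Source B's while-loop: j = text.find('\n', i); look at text[i:end].lower(); keep `start`;
-- return a single slice.  The dite guards only make the recursion total (they always hold).
def loopB (t : List Char) (start : Int) (i : Nat) : List Char :=
  let j := PySem.Chars.findFrom t ['\n'] (i : Int)
  let e : Int := if j = -1 then (t.length : Int) else j
  let low := PySem.Chars.lower (PySem.List.slice t (some (i : Int)) (some e))
  if start < 0 then
    let start' : Int := if eduHit low then (i : Int) else start
    if hj : j = -1 then
      (if 0 ≤ start' then PySem.List.slice t (some start') none else [])
    else if h : i ≤ j.toNat ∧ i ≤ t.length then loopB t start' (j.toNat + 1) else []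
  else
    if stopHit low && !eduHit low then
      PySem.List.slice t (some start) (some ((i : Int) - 1))
    else if hj : j = -1 then PySem.List.slice t (some start) none
    else if h : i ≤ j.toNat ∧ i ≤ t.length then loopB t start (j.toNat + 1) else []
termination_by t.length + 1 - i
decreasing_by all_goals omega

def extract_education_section_py_alt (text : String) : String :=
  String.ofList (loopB text.toList (-1) 0)

-- ===== PRECONDITION & SPEC =====
def Spec_extract_education_section_py (text : String) (out : String) : Prop := out = extract_education_section_py_alt text
instance (text : String) (out : String) : Decidable (Spec_extract_education_section_py text out) := by unfold Spec_extract_education_section_py; infer_instance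

-- ===== CLAIM (what is proved, stated in full; the proofs are below) =====
def Claim_equal_extract_education_section_py : Prop := ∀ (text : String), Dom_extract_education_section_py text → Spec_extract_education_section_py text (extract_education_section_py text)

-- ===== LEMMAS AND PROOFS =====

-- char-level line predicates (line not yet lowered)
def hitE (l : List Char) : Bool := eduHit (PySem.Chars.lower l)
def hitS (l : List Char) : Bool := stopHit (PySem.Chars.lower l)
def stopC (l : List Char) : Bool := hitS l && !hitE l
def stopP (l : String) : Bool := isStopLine l && !isEduLine l

theorem isEduLine_eq (l : String) : isEduLine l = hitE l.toList := by
  simp [isEduLine, hitE, eduHit, eduKws, eduKwsC, PySem.Str.isIn_eq, PySem.Str.toList_lower]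

theorem isStopLine_eq (l : String) : isStopLine l = hitS l.toList := by
  simp [isStopLine, hitS, stopHit, stopKws, stopKwsC, PySem.Str.isIn_eq, PySem.Str.toList_lower]

theorem stopP_eq (l : String) : stopP l = stopC l.toList := by
  simp [stopP, stopC, isEduLine_eq, isStopLine_eq]

-- ---------- A-side: the flag loop equals first-edu-index + take-until-stop ----------

theorem loopA_true (ls : List String) :
    loopA ls true = ls.take ((ls.findIdx? stopP).getD ls.length) := by
  induction ls with
  | nil => rfl
  | cons l rest ih =>
      by_cases he : isEduLine l = true
      · have hp : stopP l = false := by simp [stopP, he]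
        simp [loopA, he, List.findIdx?_cons, hp, Option.getD_map, ih]
      · by_cases hs : isStopLine l = true
        · have hp : stopP l = true := by simp [stopP, he, hs]
          simp [loopA, he, hs, List.findIdx?_cons, hp]
        · have hp : stopP l = false := by simp [stopP, hs]
          simp [loopA, he, hs, List.findIdx?_cons, hp, Option.getD_map, ih]

-- the per-version result shapes at the line level
def bslice (ls : List String) : List String :=
  match ls.findIdx? isEduLine with
  | none => []
  | some s => (ls.drop s).take (((ls.drop (s + 1)).findIdx? stopP).getD (ls.drop (s + 1)).length + 1)

def bsliceC (ls : List (List Char)) : List (List Char) :=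
  match ls.findIdx? hitE with
  | none => []
  | some s => (ls.drop s).take (((ls.drop (s + 1)).findIdx? stopC).getD (ls.drop (s + 1)).length + 1)

theorem loopA_false (ls : List String) : loopA ls false = bslice ls := by
  induction ls with
  | nil => rfl
  | cons l rest ih =>
      by_cases he : isEduLine l = true
      · simp only [bslice, List.findIdx?_cons, he, if_pos, loopA, List.drop_zero, List.drop_succ_cons,
          List.drop_zero, List.take_succ_cons, loopA_true]
      · simp only [loopA, he, Bool.false_and, ih, bslice, List.findIdx?_cons,
          if_false, Bool.false_eq_true]
        cases h : rest.findIdx? isEduLine with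
        | none => simp
        | some s => simp [List.drop_succ_cons]

theorem bslice_map (ls : List String) :
    (bslice ls).map String.toList = bsliceC (ls.map String.toList) := by
  have hc1 : (hitE ∘ String.toList) = isEduLine := by
    funext s; simp [Function.comp, isEduLine_eq]
  have hc2 : (stopC ∘ String.toList) = stopP := by
    funext s; simp [Function.comp, stopP_eq]
  unfold bslice bsliceC
  rw [List.findIdx?_map, hc1]
  cases h : ls.findIdx? isEduLine with
  | none => simp
  | some k =>
      simp only [← List.map_take, ← List.map_drop, List.findIdx?_map, hc2, List.length_map]

-- ---------- splitOn / find / intercalate infrastructure ----------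

theorem isPrefixOf_nl (c : Char) (u : List Char) :
    (['\n'] : List Char).isPrefixOf (c :: u) = (c == '\n') := by
  simp [List.isPrefixOf, Bool.beq_comm]

theorem splitOn_go_acc (fuel : Nat) : ∀ (l cur : List Char) (acc : List (List Char)),
    PySem.Chars.splitOn.go ['\n'] fuel l cur acc = acc.reverse ++ PySem.Chars.splitOn.go ['\n'] fuel l cur [] := by
  induction fuel with
  | zero => intro l cur acc; simp [PySem.Chars.splitOn.go]
  | succ f ih =>
      intro l cur acc
      cases l with
      | nil => simp [PySem.Chars.splitOn.go]
      | cons c rest =>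
          simp only [PySem.Chars.splitOn.go]
          by_cases hp : (['\n'] : List Char).isPrefixOf (c :: rest) = true
          · rw [if_pos hp, if_pos hp, ih _ _ (cur.reverse :: acc), ih _ _ [cur.reverse]]
            simp
          · rw [if_neg hp, if_neg hp, ih]

theorem splitOn_go_no_nl : ∀ (l : List Char) (fuel : Nat) (cur : List Char) (acc : List (List Char)),
    l.length < fuel → '\n' ∉ l →
    PySem.Chars.splitOn.go ['\n'] fuel l cur acc = ((cur.reverse ++ l) :: acc).reverse := by
  intro l
  induction l with
  | nil => intro fuel cur acc hf _; cases fuel with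
      | zero => omega
      | succ f => simp [PySem.Chars.splitOn.go]
  | cons c rest ih =>
      intro fuel cur acc hf hnl
      obtain ⟨h1, h2⟩ : ¬'\n' = c ∧ '\n' ∉ rest := by simpa using hnl
      cases fuel with
      | zero => simp at hf
      | succ f =>
          have hc : (c == '\n') = false := by simp; exact fun h => h1 h.symm
          simp only [PySem.Chars.splitOn.go, isPrefixOf_nl, hc]
          rw [if_neg (by simp)]
          rw [ih f (c :: cur) acc (by simpa using hf) h2]
          simp

theorem splitOn_go_step (a : List Char) (hnl : '\n' ∉ a) :
    ∀ (fuel : Nat) (b cur : List Char) (acc : List (List Char)), a.length < fuel →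
    PySem.Chars.splitOn.go ['\n'] fuel (a ++ '\n' :: b) cur acc
      = PySem.Chars.splitOn.go ['\n'] (fuel - a.length - 1) b [] ((cur.reverse ++ a) :: acc) := by
  induction a with
  | nil =>
      intro fuel b cur acc hf
      cases fuel with
      | zero => omega
      | succ f => simp [PySem.Chars.splitOn.go]
  | cons c a' ih =>
      intro fuel b cur acc hf
      obtain ⟨h1, h2⟩ : ¬'\n' = c ∧ '\n' ∉ a' := by simpa using hnl
      cases fuel with
      | zero => simp at hf
      | succ f =>
          have hc : (c == '\n') = false := by simp; exact fun h => h1 h.symm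
          simp only [List.cons_append, PySem.Chars.splitOn.go, isPrefixOf_nl, hc]
          rw [if_neg (by simp)]
          rw [ih h2 f b (c :: cur) acc (by simpa using hf)]
          simp only [List.reverse_cons, List.length_cons]
          congr 2
          · omega
          · simp

-- now the derived ones

theorem splitOn_no_nl (u : List Char) (hnl : '\n' ∉ u) : PySem.Chars.splitOn u ['\n'] = [u] := by
  unfold PySem.Chars.splitOn
  rw [splitOn_go_no_nl u (u.length + 1) [] [] (by omega) hnl]
  simp

theorem splitOn_cons (a b : List Char) (hnl : '\n' ∉ a) :
    PySem.Chars.splitOn (a ++ '\n' :: b) ['\n'] = a :: PySem.Chars.splitOn b ['\n'] := by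
  unfold PySem.Chars.splitOn
  rw [splitOn_go_step a hnl _ b [] [] (by simp)]
  rw [splitOn_go_acc]
  have : (a ++ '\n' :: b).length + 1 - a.length - 1 = b.length + 1 := by simp; omega
  rw [this]
  simp

theorem mem_decomp (u : List Char) (h : '\n' ∈ u) :
    u = u.takeWhile (· ≠ '\n') ++ '\n' :: (u.dropWhile (· ≠ '\n')).tail := by
  induction u with
  | nil => simp at h
  | cons c rest ih =>
      by_cases hc : c = '\n'
      · subst hc; simp [List.takeWhile, List.dropWhile]
      · have hm : '\n' ∈ rest := by
          rcases List.mem_cons.mp h with h1 | h1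
          · exact absurd h1.symm hc
          · exact h1
        have hd : (decide (c ≠ '\n')) = true := by simp [hc]
        simp only [List.takeWhile_cons, List.dropWhile_cons, hd, if_pos, List.cons_append]
        rw [← ih hm]

theorem nl_notin_takeWhile (u : List Char) : '\n' ∉ u.takeWhile (· ≠ '\n') := by
  intro h
  have := List.mem_takeWhile_imp h
  simp at this

theorem ic_cons (l : List Char) (r : List (List Char)) (h : r ≠ []) :
    List.intercalate ['\n'] (l :: r) = l ++ '\n' :: List.intercalate ['\n'] r := by
  cases r with
  | nil => exact absurd rfl h
  | cons l2 r2 => simp [List.intercalate, List.intersperse]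

theorem splitOn_ne_nil (u : List Char) : PySem.Chars.splitOn u ['\n'] ≠ [] := by
  by_cases hm : '\n' ∈ u
  · rw [mem_decomp u hm, splitOn_cons _ _ (nl_notin_takeWhile u)]; simp
  · rw [splitOn_no_nl u hm]; simp

theorem intercalate_splitOn : ∀ (n : Nat) (u : List Char), u.length ≤ n →
    List.intercalate ['\n'] (PySem.Chars.splitOn u ['\n']) = u := by
  intro n
  induction n with
  | zero => intro u h
            have : u = [] := List.length_eq_zero_iff.mp (by omega)
            subst this; rw [splitOn_no_nl _ (by simp)]; simp [List.intercalate]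
  | succ m ih =>
      intro u h
      by_cases hm : '\n' ∈ u
      · have hdec := mem_decomp u hm
        set a := u.takeWhile (· ≠ '\n') with ha
        set b := (u.dropWhile (· ≠ '\n')).tail with hb
        rw [hdec, splitOn_cons a b (nl_notin_takeWhile u)]
        have hlen : b.length ≤ m := by
          have := congrArg List.length hdec
          simp at this; omega
        rw [ic_cons _ _ (splitOn_ne_nil b), ih b hlen]
      · rw [splitOn_no_nl _ hm]; simp [List.intercalate]

theorem no_nl_splitOn : ∀ (n : Nat) (u : List Char), u.length ≤ n →
    ∀ l ∈ PySem.Chars.splitOn u ['\n'], '\n' ∉ l := by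
  intro n
  induction n with
  | zero => intro u h
            have : u = [] := List.length_eq_zero_iff.mp (by omega)
            subst this; rw [splitOn_no_nl _ (by simp)]; simp
  | succ m ih =>
      intro u h
      by_cases hm : '\n' ∈ u
      · have hdec := mem_decomp u hm
        set a := u.takeWhile (· ≠ '\n') with ha
        set b := (u.dropWhile (· ≠ '\n')).tail with hb
        rw [hdec, splitOn_cons a b (nl_notin_takeWhile u)]
        intro l hl
        rcases List.mem_cons.mp hl with h1 | h1
        · subst h1; exact nl_notin_takeWhile u
        · have hlen : b.length ≤ m := by
            have := congrArg List.length hdec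
            simp at this; omega
          exact ih b hlen l h1
      · rw [splitOn_no_nl _ hm]
        intro l hl
        simp at hl; subst hl; exact hm

theorem find_go_nl (u : List Char) : ∀ (k : Nat),
    PySem.Chars.find.go ['\n'] u k
      = if '\n' ∈ u then ((k : Int) + (u.takeWhile (· ≠ '\n')).length) else -1 := by
  induction u with
  | nil => intro k; simp [PySem.Chars.find.go]
  | cons c rest ih =>
      intro k
      by_cases hc : c = '\n'
      · subst hc
        simp [PySem.Chars.find.go, List.isPrefixOf]
      · have hp : (['\n'] : List Char).isPrefixOf (c :: rest) = false := by
          simp [List.isPrefixOf]; exact fun h => hc h.symm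
        simp only [PySem.Chars.find.go, hp]
        rw [if_neg (by simp)]
        rw [ih (k+1)]
        have hd : (decide (c ≠ '\n')) = true := by simp [hc]
        simp only [List.mem_cons, List.takeWhile_cons, hd, if_pos]
        by_cases hm : '\n' ∈ rest
        · rw [if_pos hm, if_pos (by right; exact hm)]
          simp; ring
        · rw [if_neg hm, if_neg (by rintro (h | h); exact hc h.symm; exact hm h)]

theorem find_nl (u : List Char) :
    PySem.Chars.find u ['\n'] = if '\n' ∈ u then ((u.takeWhile (· ≠ '\n')).length : Int) else -1 := by
  unfold PySem.Chars.find
  rw [find_go_nl u 0]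
  simp


-- ---------- B-side list-level value ----------

def stopOff : List (List Char) → Option Nat
  | [] => none
  | l :: rs => if stopC l then some 0 else (stopOff rs).map (l.length + 1 + ·)

def bvalue (t : List Char) (i : Nat) : List (List Char) → List Char
  | [] => []
  | l :: r =>
      if hitE l then
        (match stopOff r with
         | none => t.drop i
         | some off => (t.drop i).take (l.length + off))
      else bvalue t (i + l.length + 1) r

theorem tw_append (l w : List Char) (h : '\n' ∉ l) :
    (l ++ '\n' :: w).takeWhile (· ≠ '\n') = l := by
  induction l with
  | nil => simp [List.takeWhile]
  | cons c l' ih =>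
      obtain ⟨h1, h2⟩ : ¬'\n' = c ∧ '\n' ∉ l' := by simpa using h
      have hd : (decide (c ≠ '\n')) = true := by simp; exact fun hh => h1 hh.symm
      simp only [List.cons_append, List.takeWhile_cons, hd, if_pos, ih h2]

theorem drop_append_cons (l w : List Char) : (l ++ '\n' :: w).drop (l.length + 1) = w := by
  have : l ++ '\n' :: w = (l ++ ['\n']) ++ w := by simp
  rw [this]
  have h2 : l.length + 1 = (l ++ ['\n']).length := by simp
  rw [h2, List.drop_left]

-- the one-step j computation

theorem findFrom_no_nl (t : List Char) (i : Nat) (hi : i ≤ t.length) (h : '\n' ∉ t.drop i) :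
    PySem.Chars.findFrom t ['\n'] (i : Int) = -1 := by
  rw [PySem.Chars.findFrom_natCast t ['\n'] i hi, find_nl, if_neg h]
  simp

theorem findFrom_nl (t : List Char) (i : Nat) (hi : i ≤ t.length) (l w : List Char)
    (hd : t.drop i = l ++ '\n' :: w) (hnl : '\n' ∉ l) :
    PySem.Chars.findFrom t ['\n'] (i : Int) = ((i + l.length : Nat) : Int) := by
  have hmem : '\n' ∈ l ++ '\n' :: w := by simp
  rw [PySem.Chars.findFrom_natCast t ['\n'] i hi, find_nl, hd, if_pos hmem, tw_append l w hnl]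
  rw [if_neg (by omega)]
  push_cast; ring

theorem not_neg_natCast (s : Nat) : ¬((s : Int) < 0) := by omega

theorem slice_drop_all (t : List Char) (i : Nat) :
    PySem.List.slice t (some (i:Int)) (some (t.length : Int)) = t.drop i := by
  rw [PySem.List.slice_natCast]
  have h : (t.drop i).length = t.length - i := by simp
  rw [← h]; exact List.take_length

theorem loopB_pos (s : Nat) (ls : List (List Char)) : ∀ (i : Nat) (t : List Char),
    s < i → i ≤ t.length → t.drop i = List.intercalate ['\n'] ls →
    (∀ l ∈ ls, '\n' ∉ l) →
    loopB t (s : Int) i =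
      (match stopOff ls with
       | none => t.drop s
       | some off => (t.drop s).take (i + off - 1 - s)) := by
  induction ls with
  | nil =>
      intro i t hs hi hdrop _
      have hempty : t.drop i = [] := by rw [hdrop]; simp [List.intercalate]
      have hnl : '\n' ∉ t.drop i := by rw [hempty]; simp
      have h0 : stopHit (PySem.Chars.lower ([] : List Char)) = false := by decide
      rw [loopB]
      simp [findFrom_no_nl t i hi hnl, slice_drop_all, hempty, h0,
        not_neg_natCast s, stopOff, PySem.List.slice_from_natCast]
  | cons l r ih =>
      intro i t hs hi hdrop hnls
      have hnl_l : '\n' ∉ l := hnls l (by simp)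
      by_cases hr : r = []
      · subst hr
        have hdl : t.drop i = l := by rw [hdrop]; simp [List.intercalate]
        have hnl : '\n' ∉ t.drop i := by rw [hdl]; exact hnl_l
        rw [loopB]
        simp only [findFrom_no_nl t i hi hnl, reduceIte, reduceDIte, slice_drop_all, hdl,
          not_neg_natCast s, if_false]
        by_cases hst : (stopHit (PySem.Chars.lower l) && !eduHit (PySem.Chars.lower l)) = true
        · have hso : stopOff [l] = some 0 := by
            simp [stopOff, show stopC l = true from hst]
          rw [if_pos hst, hso]
          have hcast : (i:Int) - 1 = ((i - 1 : Nat) : Int) := by omega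
          rw [hcast, PySem.List.slice_natCast]
          simp
        · have hsc : stopC l = false := by
            cases he : eduHit (PySem.Chars.lower l)
            · cases hsh : stopHit (PySem.Chars.lower l)
              · simp [stopC, hitS, hitE, he, hsh]
              · exact absurd (by simp [he, hsh]) hst
            · simp [stopC, hitS, hitE, he]
          have hso : stopOff [l] = none := by simp [stopOff, hsc]
          rw [if_neg hst, hso, PySem.List.slice_from_natCast]
      · have hdl : t.drop i = l ++ '\n' :: List.intercalate ['\n'] r := by
          rw [hdrop, ic_cons l r hr]
        have hlen : t.length - i = l.length + 1 + (List.intercalate ['\n'] r).length := by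
          have := congrArg List.length hdl
          simp at this; omega
        have hi2 : i + l.length + 1 ≤ t.length := by omega
        have hj := findFrom_nl t i hi l _ hdl hnl_l
        have hjne : ((i + l.length : Nat) : Int) ≠ -1 := by omega
        have hjt : ((i + l.length : Nat) : Int).toNat = i + l.length := by omega
        have hlow : PySem.List.slice t (some (i:Int)) (some ((i + l.length : Nat) : Int)) = l := by
          rw [PySem.List.slice_natCast, hdl]
          simp
        rw [loopB]
        simp only [hj, hjne, if_neg, hjt, hlow, not_neg_natCast s, if_false, reduceIte,
          reduceDIte]
        by_cases hst : (stopHit (PySem.Chars.lower l) && !eduHit (PySem.Chars.lower l)) = true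
        · have hso : stopOff (l :: r) = some 0 := by
            simp [stopOff, show stopC l = true from hst]
          rw [if_pos hst, hso]
          have hcast : (i:Int) - 1 = ((i - 1 : Nat) : Int) := by omega
          rw [hcast, PySem.List.slice_natCast]
          simp
        · have hsc : stopC l = false := by
            cases he : eduHit (PySem.Chars.lower l)
            · cases hsh : stopHit (PySem.Chars.lower l)
              · simp [stopC, hitS, hitE, he, hsh]
              · exact absurd (by simp [he, hsh]) hst
            · simp [stopC, hitS, hitE, he]
          rw [if_neg hst, dif_pos (by omega : i ≤ i + l.length ∧ i ≤ t.length)]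
          have hdrop2 : t.drop (i + l.length + 1) = List.intercalate ['\n'] r := by
            have h := congrArg (List.drop (l.length + 1)) hdl
            rw [List.drop_drop, drop_append_cons] at h
            rw [(by omega : i + l.length + 1 = i + (l.length + 1))]
            exact h
          rw [ih (i + l.length + 1) t (by omega) hi2 hdrop2 (fun x hx => hnls x (by simp [hx]))]
          have hso : stopOff (l :: r) = (stopOff r).map (l.length + 1 + ·) := by
            simp [stopOff, hsc]
          rw [hso]
          cases hsor : stopOff r with
          | none => simp
          | some off =>
              simp only [Option.map_some]
              congr 1
              omega

theorem loopB_neg (ls : List (List Char)) : ∀ (i : Nat) (t : List Char),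
    i ≤ t.length → t.drop i = List.intercalate ['\n'] ls →
    (∀ l ∈ ls, '\n' ∉ l) →
    loopB t (-1) i = bvalue t i ls := by
  induction ls with
  | nil =>
      intro i t hi hdrop _
      have hempty : t.drop i = [] := by rw [hdrop]; simp [List.intercalate]
      have hnl : '\n' ∉ t.drop i := by rw [hempty]; simp
      have h0 : eduHit (PySem.Chars.lower ([] : List Char)) = false := by decide
      rw [loopB]
      simp [findFrom_no_nl t i hi hnl, slice_drop_all, hempty, h0, bvalue]
  | cons l r ih =>
      intro i t hi hdrop hnls
      have hnl_l : '\n' ∉ l := hnls l (by simp)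
      by_cases hr : r = []
      · subst hr
        have hdl : t.drop i = l := by rw [hdrop]; simp [List.intercalate]
        have hnl : '\n' ∉ t.drop i := by rw [hdl]; exact hnl_l
        rw [loopB]
        simp only [findFrom_no_nl t i hi hnl, reduceIte, reduceDIte, slice_drop_all, hdl]
        by_cases he : eduHit (PySem.Chars.lower l) = true
        · simp only [he, if_true, reduceIte, decide_true]
          rw [if_pos (by omega : (0:Int) ≤ (i:Int)), PySem.List.slice_from_natCast]
          simp [bvalue, hitE, he, stopOff]
        · simp only [he, if_false, Bool.false_eq_true, reduceIte]
          rw [if_neg (by omega : ¬(0:Int) ≤ (-1:Int))]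
          simp [bvalue, hitE, he]
      · have hdl : t.drop i = l ++ '\n' :: List.intercalate ['\n'] r := by
          rw [hdrop, ic_cons l r hr]
        have hlen : t.length - i = l.length + 1 + (List.intercalate ['\n'] r).length := by
          have := congrArg List.length hdl
          simp at this; omega
        have hi2 : i + l.length + 1 ≤ t.length := by omega
        have hj := findFrom_nl t i hi l _ hdl hnl_l
        have hjne : ((i + l.length : Nat) : Int) ≠ -1 := by omega
        have hjt : ((i + l.length : Nat) : Int).toNat = i + l.length := by omega
        have hlow : PySem.List.slice t (some (i:Int)) (some ((i + l.length : Nat) : Int)) = l := by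
          rw [PySem.List.slice_natCast, hdl]
          simp
        have hdrop2 : t.drop (i + l.length + 1) = List.intercalate ['\n'] r := by
          have h := congrArg (List.drop (l.length + 1)) hdl
          rw [List.drop_drop, drop_append_cons] at h
          rw [(by omega : i + l.length + 1 = i + (l.length + 1))]
          exact h
        rw [loopB]
        simp only [hj, hjne, if_neg, hjt, hlow, reduceIte, reduceDIte]
        by_cases he : eduHit (PySem.Chars.lower l) = true
        · simp only [he, if_true, reduceIte]
          rw [dif_pos (by omega : i ≤ i + l.length ∧ i ≤ t.length)]
          rw [loopB_pos i r (i + l.length + 1) t (by omega) hi2 hdrop2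
                (fun x hx => hnls x (by simp [hx]))]
          simp only [bvalue, hitE, he, if_true, reduceIte]
          cases hsor : stopOff r with
          | none => simp
          | some off =>
              simp only []
              rw [(by omega : i + l.length + 1 + off - 1 - i = l.length + off)]
              simp
        · simp only [he, if_false, Bool.false_eq_true, reduceIte]
          rw [dif_pos (by omega : i ≤ i + l.length ∧ i ≤ t.length)]
          rw [ih (i + l.length + 1) t hi2 hdrop2 (fun x hx => hnls x (by simp [hx]))]
          simp [bvalue, hitE, he]

theorem stopOff_none (r : List (List Char)) : stopOff r = none ↔ r.findIdx? stopC = none := by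
  induction r with
  | nil => simp [stopOff]
  | cons x xs ih =>
      by_cases hx : stopC x = true
      · simp [stopOff, hx, List.findIdx?_cons]
      · simp [stopOff, hx, List.findIdx?_cons, ih]

theorem take_append_add (l y : List Char) (n : Nat) :
    (l ++ y).take (l.length + n) = l ++ y.take n := by
  rw [List.take_append]
  congr 1
  · exact List.take_of_length_le (by omega)
  · congr 1
    omega

theorem ic_take (r : List (List Char)) : ∀ (l : List Char),
    (match stopOff r with
     | none => List.intercalate ['\n'] (l :: r)
     | some off => (List.intercalate ['\n'] (l :: r)).take (l.length + off))
    = List.intercalate ['\n'] ((l :: r).take (((r.findIdx? stopC).getD r.length) + 1)) := by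
  induction r with
  | nil => intro l; simp [stopOff, List.intercalate]
  | cons l2 r2 ih =>
      intro l
      by_cases hs : stopC l2 = true
      · simp only [stopOff, hs, if_true, reduceIte, List.findIdx?_cons, List.take_succ_cons]
        rw [ic_cons l (l2 :: r2) (by simp)]
        simp [List.intercalate, take_append_add l ('\n' :: List.intercalate ['\n'] (l2 :: r2)) 0]
      · have h1 : stopOff (l2 :: r2) = (stopOff r2).map (l2.length + 1 + ·) := by
          simp [stopOff, hs]
        have h2 : (l2 :: r2).findIdx? stopC = (r2.findIdx? stopC).map (· + 1) := by
          simp [List.findIdx?_cons, hs]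
        rw [h1, h2]
        have ih2 := ih l2
        cases hso : stopOff r2 with
        | none =>
            have hfi : r2.findIdx? stopC = none := (stopOff_none r2).mp hso
            simp only [Option.map_none, Option.getD_none, hfi]
            rw [List.take_of_length_le (by simp)]
        | some off =>
            obtain ⟨k, hfi⟩ : ∃ k, r2.findIdx? stopC = some k := by
              cases h : r2.findIdx? stopC with
              | none => rw [(stopOff_none r2).mpr h] at hso; exact absurd hso (by simp)
              | some k => exact ⟨k, rfl⟩
            rw [hso, hfi] at ih2
            simp only [] at ih2
            simp only [Option.map_some, Option.getD_some, hfi]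
            rw [ic_cons l (l2 :: r2) (by simp)]
            have hX : l.length + (l2.length + 1 + off) = l.length + (1 + (l2.length + off)) := by omega
            rw [hX, take_append_add l ('\n' :: List.intercalate ['\n'] (l2 :: r2)) (1 + (l2.length + off))]
            have : ('\n' :: List.intercalate ['\n'] (l2 :: r2)).take (1 + (l2.length + off))
                 = '\n' :: (List.intercalate ['\n'] (l2 :: r2)).take (l2.length + off) := by
              rw [(by omega : 1 + (l2.length + off) = (l2.length + off) + 1)]
              simp [List.take_succ_cons]
            rw [this, ih2]
            simp only [Option.getD_some, List.take_succ_cons]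
            rw [ic_cons l (l2 :: r2.take k) (by simp)]

theorem bsliceC_cons_neg (l : List Char) (r : List (List Char)) (he : hitE l = false) :
    bsliceC (l :: r) = bsliceC r := by
  unfold bsliceC
  rw [List.findIdx?_cons, if_neg (by simp [he])]
  cases h : r.findIdx? hitE with
  | none => simp
  | some k => simp [List.drop_succ_cons]

theorem bvalue_eq_bsliceC (ls : List (List Char)) : ∀ (t : List Char) (i : Nat),
    t.drop i = List.intercalate ['\n'] ls →
    bvalue t i ls = List.intercalate ['\n'] (bsliceC ls) := by
  induction ls with
  | nil => intro t i _; simp [bvalue, bsliceC, List.intercalate]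
  | cons l r ih =>
      intro t i hdrop
      by_cases he : hitE l = true
      · have hb : bsliceC (l :: r) =
            (l :: r).take (((r.findIdx? stopC).getD r.length) + 1) := by
          unfold bsliceC
          rw [List.findIdx?_cons, if_pos (by simp [he])]
          simp [List.drop_succ_cons]
        rw [hb]
        simp only [bvalue, he, if_true, reduceIte]
        rw [← ic_take r l, ← hdrop]
      · have hdrop2 : t.drop (i + l.length + 1) = List.intercalate ['\n'] r := by
          by_cases hr : r = []
          · subst hr
            have hdl : t.drop i = l := by rw [hdrop]; simp [List.intercalate]
            have h := congrArg (List.drop (l.length + 1)) hdl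
            rw [List.drop_drop] at h
            rw [(by omega : i + l.length + 1 = i + (l.length + 1))]
            rw [h]
            simp [List.intercalate]
          · have hdl : t.drop i = l ++ '\n' :: List.intercalate ['\n'] r := by
              rw [hdrop, ic_cons l r hr]
            have h := congrArg (List.drop (l.length + 1)) hdl
            rw [List.drop_drop, drop_append_cons] at h
            rw [(by omega : i + l.length + 1 = i + (l.length + 1))]
            exact h
        simp only [bvalue, he, if_false, Bool.false_eq_true, reduceIte]
        rw [ih t (i + l.length + 1) hdrop2, bsliceC_cons_neg l r (by simpa using he)]


-- ===== VERDICT (by name: the statement is the Claim_ definition above) =====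
theorem toList_pyLines (text : String) :
    (pyLines text).map String.toList = PySem.Chars.splitOn text.toList ['\n'] := by
  have hsep : ("\n" : String).toList = ['\n'] := by decide
  have h := PySem.Str.split?_map text "\n"
  rw [hsep] at h
  rw [show PySem.Chars.split? text.toList ['\n']
        = some (PySem.Chars.splitOn text.toList ['\n']) from by
      simp [PySem.Chars.split?]] at h
  cases hs : PySem.Str.split? text "\n" with
  | none => rw [hs] at h; simp at h
  | some xs =>
      rw [hs] at h
      simp only [Option.map_some, Option.some.injEq] at h
      simp [pyLines, hs, h]

theorem extract_education_section_py_spec : Claim_equal_extract_education_section_py := by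
  intro text _
  show extract_education_section_py text = extract_education_section_py_alt text
  unfold extract_education_section_py extract_education_section_py_alt
  rw [loopA_false]
  refine String.toList_inj.mp ?_
  rw [PySem.Str.toList_join]
  have hsep : ("\n" : String).toList = ['\n'] := by decide
  rw [hsep]
  have hjoin : PySem.Chars.join ['\n'] ((bslice (pyLines text)).map String.toList)
      = List.intercalate ['\n'] ((bslice (pyLines text)).map String.toList) := rfl
  rw [hjoin, bslice_map, toList_pyLines]
  have halt : (String.ofList (loopB text.toList (-1) 0)).toList = loopB text.toList (-1) 0 := by
    simp
  rw [halt]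
  have hdrop0 : text.toList.drop 0
      = List.intercalate ['\n'] (PySem.Chars.splitOn text.toList ['\n']) := by
    simpa using (intercalate_splitOn text.toList.length text.toList le_rfl).symm
  have hnls := no_nl_splitOn text.toList.length text.toList le_rfl
  rw [loopB_neg (PySem.Chars.splitOn text.toList ['\n']) 0 text.toList (by omega) hdrop0 hnls]
  rw [bvalue_eq_bsliceC (PySem.Chars.splitOn text.toList ['\n']) text.toList 0 hdrop0]
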